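-- pv_equiv track=rewrite | github.com/joanllorente/meteolabx | services/euskalmet.py | _sort_sensors_for_measure
-- ===== SOURCE A (Python) =====
-- from typing import Any, Dict, List, Optional, Tuple
--
-- MEASURE_SENSOR_PREFIXES: Dict[Tuple[str, str], List[str]] = {
--     ("measuresForAir", "temperature"): ["TA"],
--     ("measuresForAir", "humidity"): ["HA"],
--     ("measuresForAtmosphere", "pressure"): ["PA", "CT", "CB"],
--     ("measuresForAtmosphere", "sea_level_pressure"): ["PA", "CT", "CB"],
--     ("measuresForWind", "mean_direction"): ["DV"],
--     ("measuresForWind", "mean_speed"): ["VV", "DV"],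
--     ("measuresForWind", "max_speed"): ["VV", "DV"],
--     ("measuresForWater", "precipitation"): ["PL", "PR", "PP", "RR"],
--     ("measuresForSun", "irradiance"): ["SP", "RS", "SR"],
-- }
--
-- def _sort_sensors_for_measure(sensors: List[str], measure_type: str, measure_id: str) -> List[str]:
--     wanted = MEASURE_SENSOR_PREFIXES.get((measure_type, measure_id), [])
--     if not wanted:
--         return [str(s).strip().upper() for s in sensors if str(s).strip()]
--     prioritized: List[str] = []
--     fallback: List[str] = []
--     for raw in sensors:
--         sid = str(raw).strip().upper()
--         if not sid:
--             continue
--         if any(sid.startswith(pref) for pref in wanted):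
--             prioritized.append(sid)
--         else:
--             fallback.append(sid)
--     return prioritized + fallback
-- ===== SOURCE B (Python) =====
-- from typing import Dict, List, Tuple
--
-- MEASURE_SENSOR_PREFIXES: Dict[Tuple[str, str], List[str]] = {
--     ("measuresForAir", "temperature"): ["TA"],
--     ("measuresForAir", "humidity"): ["HA"],
--     ("measuresForAtmosphere", "pressure"): ["PA", "CT", "CB"],
--     ("measuresForAtmosphere", "sea_level_pressure"): ["PA", "CT", "CB"],
--     ("measuresForWind", "mean_direction"): ["DV"],
--     ("measuresForWind", "mean_speed"): ["VV", "DV"],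
--     ("measuresForWind", "max_speed"): ["VV", "DV"],
--     ("measuresForWater", "precipitation"): ["PL", "PR", "PP", "RR"],
--     ("measuresForSun", "irradiance"): ["SP", "RS", "SR"],
-- }
--
-- def _sort_sensors_for_measure(sensors: List[str], measure_type: str, measure_id: str) -> List[str]:
--     wanted = tuple(MEASURE_SENSOR_PREFIXES.get((measure_type, measure_id), []))
--     normalized = [sid for sid in (str(raw).strip().upper() for raw in sensors) if sid]
--     # stable sort on a boolean key: matches first, original order kept within each group;
--     # str.startswith(()) is False, so the empty-wanted case needs no branch
--     return sorted(normalized, key=lambda sid: not sid.startswith(wanted))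
-- ===== Notes on version B (the rewrite author's own statement) =====
-- stated objective: simpler
-- what changed: Replaces the explicit prioritized/fallback accumulator loop and the special empty-prefix branch with one normalization comprehension followed by a stable sort on the boolean key 'not sid.startswith(wanted_tuple)', relying on sort stability and startswith(()) == False.
import Mathlib
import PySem

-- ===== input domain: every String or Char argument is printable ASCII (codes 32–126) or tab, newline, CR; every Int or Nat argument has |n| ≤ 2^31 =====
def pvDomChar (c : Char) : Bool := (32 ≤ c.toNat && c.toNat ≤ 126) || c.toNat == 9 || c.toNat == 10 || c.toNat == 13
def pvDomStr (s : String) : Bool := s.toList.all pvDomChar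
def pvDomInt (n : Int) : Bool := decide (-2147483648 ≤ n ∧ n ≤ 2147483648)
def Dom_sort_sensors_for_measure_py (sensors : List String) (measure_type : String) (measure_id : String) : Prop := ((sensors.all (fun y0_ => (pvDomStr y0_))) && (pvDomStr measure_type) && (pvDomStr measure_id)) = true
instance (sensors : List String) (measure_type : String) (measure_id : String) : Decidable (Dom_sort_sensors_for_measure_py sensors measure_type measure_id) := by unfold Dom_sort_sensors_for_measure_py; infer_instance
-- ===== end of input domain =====

-- B replaces A's two-accumulator loop and empty-prefix branch by one normalization pass plus a
-- stable sort on the boolean key "does not start with a wanted prefix" (objective: simpler).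

-- ===== PORT A =====
-- module constant MEASURE_SENSOR_PREFIXES (shared by both Pythons)
def MEASURE_SENSOR_PREFIXES : PySem.Dict (String × String) (List String) :=
  PySem.Dict.ofList
    [ (("measuresForAir", "temperature"), ["TA"]),
      (("measuresForAir", "humidity"), ["HA"]),
      (("measuresForAtmosphere", "pressure"), ["PA", "CT", "CB"]),
      (("measuresForAtmosphere", "sea_level_pressure"), ["PA", "CT", "CB"]),
      (("measuresForWind", "mean_direction"), ["DV"]),
      (("measuresForWind", "mean_speed"), ["VV", "DV"]),
      (("measuresForWind", "max_speed"), ["VV", "DV"]),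
      (("measuresForWater", "precipitation"), ["PL", "PR", "PP", "RR"]),
      (("measuresForSun", "irradiance"), ["SP", "RS", "SR"]) ]

def sort_sensors_for_measure_py (sensors : List String) (measure_type : String) (measure_id : String) : List String :=
  let wanted := MEASURE_SENSOR_PREFIXES.getD (measure_type, measure_id) []
  if wanted = [] then
    -- [str(s).strip().upper() for s in sensors if str(s).strip()]
    sensors.filterMap (fun s =>
      if PySem.Str.strip s = "" then none else some (PySem.Str.upper (PySem.Str.strip s)))
  else
    -- for raw in sensors: build prioritized / fallback
    let pair := sensors.foldl (fun acc raw =>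
      let sid := PySem.Str.upper (PySem.Str.strip raw)
      if sid = "" then acc
      else if wanted.any (fun pref => PySem.Str.startswith sid pref) then (acc.1 ++ [sid], acc.2)
      else (acc.1, acc.2 ++ [sid])) ([], [])
    pair.1 ++ pair.2

-- ===== PORT B =====
def sort_sensors_for_measure_py_alt (sensors : List String) (measure_type : String) (measure_id : String) : List String :=
  let wanted := MEASURE_SENSOR_PREFIXES.getD (measure_type, measure_id) []
  let normalized := sensors.filterMap (fun raw =>
    let sid := PySem.Str.upper (PySem.Str.strip raw)
    if sid = "" then none else some sid)
  -- sorted(normalized, key=lambda sid: not sid.startswith(wanted)); startswith(()) is False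
  PySem.List.sorted normalized
    (fun sid => !(wanted.any (fun pref => PySem.Str.startswith sid pref))) false

-- ===== PRECONDITION & SPEC =====
def Spec_sort_sensors_for_measure_py (sensors : List String) (measure_type : String) (measure_id : String) (out : List String) : Prop := out = sort_sensors_for_measure_py_alt sensors measure_type measure_id
instance (sensors : List String) (measure_type : String) (measure_id : String) (out : List String) : Decidable (Spec_sort_sensors_for_measure_py sensors measure_type measure_id out) := by unfold Spec_sort_sensors_for_measure_py; infer_instance

-- ===== CLAIM (what is proved, stated in full; the proofs are below) =====
def Claim_equal_sort_sensors_for_measure_py : Prop := ∀ (sensors : List String) (measure_type : String) (measure_id : String), Dom_sort_sensors_for_measure_py sensors measure_type measure_id → Spec_sort_sensors_for_measure_py sensors measure_type measure_id (sort_sensors_for_measure_py sensors measure_type measure_id)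

-- ===== LEMMAS AND PROOFS =====

-- str.upper() of a string is empty iff the string is
theorem upper_eq_empty_iff (s : String) : PySem.Str.upper s = "" ↔ s = "" := by
  constructor <;> intro h
  · have h2 := congrArg String.toList h
    simp [PySem.Str.toList_upper, PySem.Chars.upper] at h2
    cases s; simp_all
  · subst h; rfl

-- inserting into a partition A++B (A all p, B all not-p) with key !p keeps it a partition
theorem insertBy_partition (p : String → Bool) (x : String) (A B : List String)
    (hA : ∀ a ∈ A, p a = true) (hB : ∀ b ∈ B, p b = false) :
    PySem.List.insertBy (fun a b => decide ((!p a) < (!p b))) x (A ++ B) =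
      if p x then A ++ x :: B else (A ++ B) ++ [x] := by
  induction A with
  | nil =>
    induction B with
    | nil => simp [PySem.List.insertBy]
    | cons b B ihB =>
      have hb := hB b (by simp)
      by_cases hx : p x = true
      · simp [PySem.List.insertBy, hb, hx]
      · have hx' : p x = false := by simp [Bool.not_eq_true] at hx; exact hx
        have ih := ihB (fun y hy => hB y (by simp [hy]))
        simp [hx'] at ih
        simp [PySem.List.insertBy, hb, hx', ih]
  | cons a A ihA =>
    have ha := hA a (by simp)
    have ih := ihA (fun y hy => hA y (by simp [hy]))
    by_cases hx : p x = true <;>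
      simp_all [PySem.List.insertBy]

-- folding insertions over xs extends the two blocks with the filtered elements, in order
theorem foldl_insert_partition (p : String → Bool) (xs A B : List String)
    (hA : ∀ a ∈ A, p a = true) (hB : ∀ b ∈ B, p b = false) :
    xs.foldl (fun acc x => PySem.List.insertBy (fun a b => decide ((!p a) < (!p b))) x acc) (A ++ B)
      = (A ++ xs.filter p) ++ (B ++ xs.filter (fun x => !p x)) := by
  induction xs generalizing A B with
  | nil => simp
  | cons x xs ih =>
    simp only [List.foldl_cons, insertBy_partition p x A B hA hB]
    by_cases hx : p x = true
    · have h1 : A ++ x :: B = (A ++ [x]) ++ B := by simp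
      rw [if_pos hx, h1,
        ih (A ++ [x]) B (by intro a ha; rcases List.mem_append.1 ha with h | h;
                            · exact hA a h
                            · simp at h; simpa [h] using hx) hB]
      simp [hx]
    · have hx' : p x = false := by simp [Bool.not_eq_true] at hx; exact hx
      have h1 : (A ++ B) ++ [x] = A ++ (B ++ [x]) := by simp
      rw [if_neg hx, h1,
        ih A (B ++ [x]) hA (by intro b hb; rcases List.mem_append.1 hb with h | h;
                               · exact hB b h
                               · simp at h; simpa [h] using hx')]
      simp [hx']

-- stable sort on the boolean key !p is the stable partition: p-elements first, order kept
theorem sorted_bool_partition (p : String → Bool) (xs : List String) :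
    PySem.List.sorted xs (fun x => !p x) false
      = xs.filter p ++ xs.filter (fun x => !p x) := by
  have h := foldl_insert_partition p xs [] [] (by simp) (by simp)
  simpa [PySem.List.sorted_eq_foldl_insertBy] using h

theorem sort_sensors_main (sensors : List String) (measure_type measure_id : String) :
    sort_sensors_for_measure_py sensors measure_type measure_id
      = sort_sensors_for_measure_py_alt sensors measure_type measure_id := by
  unfold sort_sensors_for_measure_py sort_sensors_for_measure_py_alt
  set wanted := MEASURE_SENSOR_PREFIXES.getD (measure_type, measure_id) [] with hw
  set p : String → Bool := fun sid => wanted.any (fun pref => PySem.Str.startswith sid pref) with hp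
  set normalized := sensors.filterMap (fun raw =>
    let sid := PySem.Str.upper (PySem.Str.strip raw)
    if sid = "" then none else some sid) with hn
  rw [sorted_bool_partition p normalized]
  by_cases hwe : wanted = []
  · rw [if_pos hwe]
    have hpf : ∀ x, p x = false := by intro x; simp [hp, hwe]
    have h1 : normalized.filter p = [] := by
      simp [List.filter_eq_nil_iff, hpf]
    have h2 : normalized.filter (fun x => !p x) = normalized := by
      simp [hpf]
    rw [h1, h2, List.nil_append, hn]
    apply List.filterMap_congr
    intro s _
    by_cases hs : PySem.Str.strip s = ""
    · simp [hs, show PySem.Str.upper "" = "" from rfl]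
    · have : ¬ PySem.Str.upper (PySem.Str.strip s) = "" := fun h =>
        hs ((upper_eq_empty_iff (PySem.Str.strip s)).1 h)
      simp [hs, this]
  · rw [if_neg hwe]
    -- loop invariant: the accumulator pair is (pr ++ filter p, fb ++ filter !p) of the prefix
    have key : ∀ (xs : List String) (pr fb : List String),
        xs.foldl (fun acc raw =>
          let sid := PySem.Str.upper (PySem.Str.strip raw)
          if sid = "" then acc
          else if wanted.any (fun pref => PySem.Str.startswith sid pref) then (acc.1 ++ [sid], acc.2)
          else (acc.1, acc.2 ++ [sid])) (pr, fb)
          = (pr ++ (xs.filterMap (fun raw =>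
                let sid := PySem.Str.upper (PySem.Str.strip raw)
                if sid = "" then none else some sid)).filter p,
             fb ++ (xs.filterMap (fun raw =>
                let sid := PySem.Str.upper (PySem.Str.strip raw)
                if sid = "" then none else some sid)).filter (fun x => !p x)) := by
      intro xs
      induction xs with
      | nil => intro pr fb; simp
      | cons x xs ih =>
        intro pr fb
        simp only [List.foldl_cons, List.filterMap_cons]
        by_cases h0 : PySem.Str.upper (PySem.Str.strip x) = ""
        · simp only [h0, reduceIte]
          exact ih pr fb
        · simp only [h0, reduceIte]
          by_cases h1 : wanted.any (fun pref => PySem.Str.startswith (PySem.Str.upper (PySem.Str.strip x)) pref) = true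
          · have hpx : p (PySem.Str.upper (PySem.Str.strip x)) = true := by simpa [hp] using h1
            simp only [h1, reduceIte, ih (pr ++ [PySem.Str.upper (PySem.Str.strip x)]) fb,
              List.filter_cons, hpx]
            simp
          · have h1' : wanted.any (fun pref => PySem.Str.startswith (PySem.Str.upper (PySem.Str.strip x)) pref) = false := by
              simpa using h1
            have hpx : p (PySem.Str.upper (PySem.Str.strip x)) = false := by simpa [hp] using h1'
            simp only [h1', Bool.false_eq_true, reduceIte,
              ih pr (fb ++ [PySem.Str.upper (PySem.Str.strip x)]), List.filter_cons, hpx]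
            simp
    simp only [key sensors [] [], List.nil_append, hn]

-- ===== VERDICT (by name: the statement is the Claim_ definition above) =====
theorem sort_sensors_for_measure_py_spec : Claim_equal_sort_sensors_for_measure_py := by
  intro sensors measure_type measure_id _
  unfold Spec_sort_sensors_for_measure_py
  exact sort_sensors_main sensors measure_type measure_id
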